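-- pv_equiv track=rewrite | github.com/irrrrrrrrr/MAISE_RecSys_Group8_Ass | GUI-copy.py | score_characteristics
-- ===== SOURCE A (Python) =====
-- def score_characteristics(recommendations):
--     scores = {"Type": {}, "Body": {}}
--     score = len(recommendations)
--     c = 0
--     for wine in recommendations:
--         for key, value in wine.items():
--             if key in ["WineID", "Rating"]:
--                 continue
--             if key == "Type":
--                 if value not in scores["Type"]:
--                     scores["Type"][value] = 1
--                 else:
--                     scores["Type"][value] += 1
--             elif key == "Body":
--                 if value not in scores["Body"]:
--                     scores["Body"][value] = 1
--                 else:
--                     scores["Body"][value] += 1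
--         c+=1
--
--     return scores
-- ===== SOURCE B (Python) =====
-- def score_characteristics(recommendations):
--     # flatten once, then dedup-and-count for each key: no incremental tally dict
--     pairs = [(k, v) for wine in recommendations for k, v in wine.items()]
--
--     def tally(key):
--         vals = [v for k, v in pairs if k == key]
--         distinct = list(dict.fromkeys(vals))
--         return {v: vals.count(v) for v in distinct}
--
--     return {"Type": tally("Type"), "Body": tally("Body")}
-- ===== Notes on version B (the rewrite author's own statement) =====
-- stated objective: alternative
-- what changed: Replaces the single nested loop that increments a pair of mutable tally dicts by a flatten-dedup-count scheme: all (key,value) pairs are flattened once, then for each key the distinct values (first-occurrence order via dict.fromkeys) are paired with vals.count(v) scans, so no frequency dict is ever built incrementally; the dead score/c variables disappear.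
import Mathlib
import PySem

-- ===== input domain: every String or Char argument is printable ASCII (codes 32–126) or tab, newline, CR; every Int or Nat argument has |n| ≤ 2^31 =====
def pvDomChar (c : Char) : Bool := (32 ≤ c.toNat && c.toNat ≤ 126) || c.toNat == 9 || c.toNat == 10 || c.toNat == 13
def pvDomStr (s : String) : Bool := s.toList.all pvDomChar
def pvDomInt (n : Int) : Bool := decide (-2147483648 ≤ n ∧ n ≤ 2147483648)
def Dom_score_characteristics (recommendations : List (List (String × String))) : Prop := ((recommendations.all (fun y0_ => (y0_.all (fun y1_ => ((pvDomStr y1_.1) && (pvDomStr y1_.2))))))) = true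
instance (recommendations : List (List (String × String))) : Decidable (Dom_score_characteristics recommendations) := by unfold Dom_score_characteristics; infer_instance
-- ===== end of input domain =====

-- B replaces A's nested tally-dict loop by flatten once, dedup per key, then count each distinct value by scanning (alternative decomposition, not faster).

-- ===== PORT A =====
-- literal transliteration of A: one nested loop threading a pair of dicts (the dead score/c counters dropped as pure dead state)
def scA_item (tb : PySem.Dict String Int × PySem.Dict String Int) (kv : String × String) :
    PySem.Dict String Int × PySem.Dict String Int :=
  if kv.1 = "WineID" ∨ kv.1 = "Rating" then tb
  else if kv.1 = "Type" then
    (if tb.1.contains kv.2 = false then tb.1.insert kv.2 1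
     else tb.1.insert kv.2 (tb.1.getD kv.2 0 + 1), tb.2)
  else if kv.1 = "Body" then
    (tb.1,
     if tb.2.contains kv.2 = false then tb.2.insert kv.2 1
     else tb.2.insert kv.2 (tb.2.getD kv.2 0 + 1))
  else tb

def score_characteristics (recommendations : List (List (String × String))) : List (String × List (String × Int)) :=
  let tb := recommendations.foldl (fun tb wine => wine.foldl scA_item tb)
      (PySem.Dict.empty, PySem.Dict.empty)
  [("Type", tb.1.items), ("Body", tb.2.items)]

-- ===== PORT B =====
-- B: flatten all (key, value) pairs once; per key, dedup the values (dict.fromkeys order) and count each by scanning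
def scB_tally (key : String) (pairs : List (String × String)) : List (String × Int) :=
  let vals := (pairs.filter (fun kv => kv.1 == key)).map (·.2)
  (PySem.List.dedup vals).map (fun v => (v, (vals.count v : Int)))

def score_characteristics_alt (recommendations : List (List (String × String))) : List (String × List (String × Int)) :=
  let pairs := recommendations.flatMap (fun wine => wine)
  [("Type", scB_tally "Type" pairs), ("Body", scB_tally "Body" pairs)]

-- ===== PRECONDITION & SPEC =====
def Spec_score_characteristics (recommendations : List (List (String × String))) (out : List (String × List (String × Int))) : Prop := out = score_characteristics_alt recommendations
instance (recommendations : List (List (String × String))) (out : List (String × List (String × Int))) : Decidable (Spec_score_characteristics recommendations out) := by unfold Spec_score_characteristics; infer_instance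

-- ===== CLAIM (what is proved, stated in full; the proofs are below) =====
def Claim_equal_score_characteristics : Prop := ∀ (recommendations : List (List (String × String))), Dom_score_characteristics recommendations → Spec_score_characteristics recommendations (score_characteristics recommendations)

-- ===== LEMMAS AND PROOFS =====

-- A's two-branch update at one key is exactly the Counter step (modify _ 0 (· + 1))
lemma scA_step_eq_modify (d : PySem.Dict String Int) (v : String) :
    (if d.contains v = false then d.insert v 1 else d.insert v (d.getD v 0 + 1))
      = d.modify v 0 (· + 1) := by
  by_cases h : d.contains v = false
  · simp [h, PySem.Dict.modify, PySem.Dict.getD_of_not_contains d 0 h]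
  · simp [h, PySem.Dict.modify]

-- the inner item loop over one wine splits into the two per-key Counter folds
lemma scA_wine_split (wine : List (String × String)) (t b : PySem.Dict String Int) :
    wine.foldl scA_item (t, b)
      = ((((wine.filter (fun kv => kv.1 == "Type")).map (·.2)).foldl (fun d x => d.modify x 0 (· + 1)) t),
         (((wine.filter (fun kv => kv.1 == "Body")).map (·.2)).foldl (fun d x => d.modify x 0 (· + 1)) b)) := by
  induction wine generalizing t b with
  | nil => rfl
  | cons kv rest ih =>
    obtain ⟨k, v⟩ := kv
    by_cases h1 : k = "WineID" ∨ k = "Rating"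
    · have hT : (k == "Type") = false := by
        rcases h1 with h | h <;> simp [h]
      have hB : (k == "Body") = false := by
        rcases h1 with h | h <;> simp [h]
      simp [scA_item, h1, hT, hB, ih]
    · by_cases h2 : k = "Type"
      · subst h2
        simp [scA_item, ih, ← scA_step_eq_modify]
      · by_cases h3 : k = "Body"
        · subst h3
          simp [scA_item, h2, ih, ← scA_step_eq_modify]
        · have hT : (k == "Type") = false := by simp [h2]
          have hB : (k == "Body") = false := by simp [h3]
          simp [scA_item, h1, h2, h3, hT, hB, ih]

-- the whole nested loop equals the two Counter folds over the flattened, per-key-filtered values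
lemma scA_fold_split (recs : List (List (String × String))) (t b : PySem.Dict String Int) :
    recs.foldl (fun tb wine => wine.foldl scA_item tb) (t, b)
      = ((((recs.flatMap (fun wine => wine)).filter (fun kv => kv.1 == "Type")).map (·.2)).foldl (fun d x => d.modify x 0 (· + 1)) t,
         (((recs.flatMap (fun wine => wine)).filter (fun kv => kv.1 == "Body")).map (·.2)).foldl (fun d x => d.modify x 0 (· + 1)) b) := by
  induction recs generalizing t b with
  | nil => rfl
  | cons wine rest ih =>
    simp only [List.foldl_cons, scA_wine_split, ih, List.flatMap_cons,
      List.filter_append, List.map_append, List.foldl_append]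

-- ===== VERDICT (by name: the statement is the Claim_ definition above) =====
theorem score_characteristics_spec : Claim_equal_score_characteristics := by
  intro recs _
  unfold Spec_score_characteristics score_characteristics score_characteristics_alt scB_tally
  rw [scA_fold_split]
  rw [← PySem.Dict.counter_eq_foldl, ← PySem.Dict.counter_eq_foldl]
  simp only [PySem.Dict.items_counter, PySem.List.dedup_eq_ofList]
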